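-- pv_equiv track=rewrite | github.com/monris92/generated_playwright_cucumber | utils/test_enhancer.py | _might_need_specific_locator
-- ===== SOURCE A (Python) =====
-- def _might_need_specific_locator(line):
--     """Check if button locator might be ambiguous (strict mode violation risk)"""
--     # Generic button names that often appear multiple times
--     generic_names = [
--         'Delete',
--         'Cancel',
--         'OK',
--         'Yes',
--         'No',
--         'Save',
--         'Close',
--         'Submit',
--         'Edit',
--         'Remove'
--     ]
--
--     # Check if using get_by_role with generic name and no exact match
--     if 'get_by_role("button"' in line:
--         for name in generic_names:
--             if f'name="{name}"' in line and 'exact=True' not in line: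
--                 return True
--
--     return False
-- ===== SOURCE B (Python) =====
-- _GENERIC = frozenset((
--     'Delete', 'Cancel', 'OK', 'Yes', 'No',
--     'Save', 'Close', 'Submit', 'Edit', 'Remove',
-- ))
--
--
-- def _might_need_specific_locator(line):
--     """Check if button locator might be ambiguous (strict mode violation risk)"""
--     if 'get_by_role("button"' not in line or 'exact=True' in line:
--         return False
--     # single left-to-right parse: at each position that opens a name="..."
--     # value, read the value up to the closing quote and test set membership
--     for i in range(len(line)):
--         if line[i:i + 6] == 'name="':
--             rest = line[i + 6:]
--             q = rest.find('"')
--             if q != -1 and rest[:q] in _GENERIC: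
--                 return True
--     return False
-- ===== Notes on version B (the rewrite author's own statement) =====
-- stated objective: alternative
-- what changed: Instead of testing ten candidate substrings separately, B parses the line once left-to-right, extracting each role-name value between its opening and closing quotes and testing it against a frozenset of the ten generic names (the two global guards are hoisted out of the loop).
import Mathlib
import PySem

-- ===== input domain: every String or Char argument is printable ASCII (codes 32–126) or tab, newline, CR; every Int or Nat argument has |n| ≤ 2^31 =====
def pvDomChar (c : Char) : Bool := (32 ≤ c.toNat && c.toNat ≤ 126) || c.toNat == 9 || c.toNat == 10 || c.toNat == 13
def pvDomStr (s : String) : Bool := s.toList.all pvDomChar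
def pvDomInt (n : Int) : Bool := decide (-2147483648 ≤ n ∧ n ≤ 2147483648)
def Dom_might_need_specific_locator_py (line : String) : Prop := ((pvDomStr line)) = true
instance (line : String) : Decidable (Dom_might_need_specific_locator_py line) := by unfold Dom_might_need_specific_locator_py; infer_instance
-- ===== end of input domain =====

-- B replaces A's ten per-name substring scans by one left-to-right parse of the
-- line that reads each name="…" value and tests set membership (alternative
-- decomposition, same observable behaviour).

-- ===== PORT A =====
-- the literal list 'generic_names' of A
def pvGenericNames : List (List Char) :=
  ["Delete".toList, "Cancel".toList, "OK".toList, "Yes".toList, "No".toList,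
   "Save".toList, "Close".toList, "Submit".toList, "Edit".toList, "Remove".toList]

-- 'sub in line' is PySem.Chars.isIn on code points; the for-loop returning True
-- at the first hit is List.any; f'name="{name}"' is the list append below
def might_need_specific_locator_py (line : String) : Bool :=
  if PySem.Chars.isIn "get_by_role(\"button\"".toList line.toList then
    pvGenericNames.any (fun name =>
      PySem.Chars.isIn ("name=\"".toList ++ name ++ ['"']) line.toList
        && !PySem.Chars.isIn "exact=True".toList line.toList)
  else
    false

-- ===== PORT B =====
-- the frozenset _GENERIC of Source B
def pvGenericSet : PySem.Set (List Char) :=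
  PySem.Set.ofList
    ["Delete".toList, "Cancel".toList, "OK".toList, "Yes".toList, "No".toList,
     "Save".toList, "Close".toList, "Submit".toList, "Edit".toList, "Remove".toList]

-- the body of Source B's for-loop at one position i (s = line[i:]):
-- line[i:i+6] == 'name="'; rest = line[i+6:]; q = rest.find('"'); q != -1 and rest[:q] in _GENERIC
def pvHit (s : List Char) : Bool :=
  if s.take 6 = "name=\"".toList then
    decide (PySem.Chars.find (s.drop 6) ['"'] ≠ -1)
      && PySem.Set.contains pvGenericSet
           ((s.drop 6).take (PySem.Chars.find (s.drop 6) ['"']).toNat)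
  else false

-- Source B's 'for i in range(len(line))' as recursion over the suffixes of the line
def pvScanB : List Char → Bool
  | [] => false
  | c :: rest => pvHit (c :: rest) || pvScanB rest

def might_need_specific_locator_py_alt (line : String) : Bool :=
  if !PySem.Chars.isIn "get_by_role(\"button\"".toList line.toList
      || PySem.Chars.isIn "exact=True".toList line.toList then
    false
  else
    pvScanB line.toList

-- ===== PRECONDITION & SPEC =====
def Spec_might_need_specific_locator_py (line : String) (out : Bool) : Prop := out = might_need_specific_locator_py_alt line
instance (line : String) (out : Bool) : Decidable (Spec_might_need_specific_locator_py line out) := by unfold Spec_might_need_specific_locator_py; infer_instance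

-- ===== CLAIM (what is proved, stated in full; the proofs are below) =====
def Claim_equal_might_need_specific_locator_py : Prop := ∀ (line : String), Dom_might_need_specific_locator_py line → Spec_might_need_specific_locator_py line (might_need_specific_locator_py line)

-- ===== LEMMAS AND PROOFS =====

-- a singleton pattern is an infix exactly when its character occurs
theorem pv_singleton_infix_iff_mem (c : Char) (t : List Char) : [c] <:+: t ↔ c ∈ t := by
  constructor
  · intro h; exact h.sublist.subset (List.mem_singleton_self c)
  · intro h
    obtain ⟨a, b, rfl⟩ := List.append_of_mem h
    exact ⟨a, b, by simp⟩

-- every generic name is quote-free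
theorem pv_names_quote_free : ∀ n ∈ pvGenericNames, '"' ∉ n := by decide

-- when t's first quote is at position k, a quote-free n followed by '"' is a
-- prefix of t exactly when n is t's quote-free head t.take k
theorem pv_name_prefix_iff (t n : List Char) (k : Nat) (hn : '"' ∉ n)
    (hk : k < t.length) (htk : t.drop k = '"' :: t.drop (k + 1))
    (hnoq : '"' ∉ t.take k) :
    (n ++ ['"'] <+: t) ↔ n = t.take k := by
  constructor
  · rintro ⟨v, hv⟩
    rw [List.append_assoc, List.singleton_append] at hv
    subst hv
    rcases Nat.lt_trichotomy n.length k with hlt | heq | hgt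
    · exfalso
      apply hnoq
      rw [List.take_append]
      refine List.mem_append_right _ ?_
      obtain ⟨m, hm⟩ : ∃ m, k - n.length = m + 1 := ⟨k - n.length - 1, by omega⟩
      rw [hm]
      simp
    · subst heq
      exact (List.take_left ..).symm
    · exfalso
      apply hn
      have h3 : (n ++ '"' :: v)[k] = '"' := by
        have h2 := (List.drop_eq_getElem_cons hk).symm.trans htk
        exact (List.cons.injEq _ _ _ _ ▸ h2).1
      rw [List.getElem_append_left hgt] at h3
      exact h3 ▸ List.getElem_mem _
  · rintro rfl
    refine ⟨t.drop (k + 1), ?_⟩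
    rw [List.append_assoc, List.singleton_append, htk.symm]
    exact List.take_append_drop k t

-- the loop body at one position finds exactly the generic name="…" patterns
-- that start there
theorem pv_hit_eq (s : List Char) :
    pvHit s = pvGenericNames.any (fun n => decide ("name=\"".toList ++ n ++ ['"'] <+: s)) := by
  unfold pvHit
  by_cases h6 : s.take 6 = "name=\"".toList
  · rw [if_pos h6]
    have hs : s = "name=\"".toList ++ s.drop 6 := by
      conv_lhs => rw [← List.take_append_drop 6 s]
      rw [h6]
    set t := s.drop 6 with ht
    have hpre : ∀ n : List Char, ("name=\"".toList ++ n ++ ['"'] <+: s) ↔ (n ++ ['"'] <+: t) := by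
      intro n
      conv_lhs => rw [hs, List.append_assoc]
      exact List.prefix_append_right_inj _
    by_cases hq : PySem.Chars.find t ['"'] = -1
    · have hnoq : ¬ (['"'] <:+: t) := (PySem.Chars.find_eq_neg_one_iff t ['"']).mp hq
      have hdec : (decide (PySem.Chars.find t ['"'] ≠ -1)) = false := by
        simp [hq]
      rw [hdec, Bool.false_and, eq_comm, List.any_eq_false]
      intro n _
      simp only [decide_eq_true_eq, hpre n]
      intro hcon
      exact hnoq ((pv_singleton_infix_iff_mem '"' t).mpr (hcon.subset (by simp)))
    · have h0 : 0 ≤ PySem.Chars.find t ['"'] := by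
        have := PySem.Chars.neg_one_le_find t ['"']
        omega
      obtain ⟨hfst, hmin⟩ := PySem.Chars.find_spec h0
      set k := (PySem.Chars.find t ['"']).toNat with hkdef
      obtain ⟨u, hu⟩ := hfst
      have hdropk : t.drop k = '"' :: u := by simpa using hu.symm
      have hk : k < t.length := by
        by_contra hge
        have hnil : t.drop k = [] := List.drop_eq_nil_iff.mpr (by omega)
        rw [hnil] at hdropk
        simp at hdropk
      have huu : u = t.drop (k + 1) := by
        have h := congrArg List.tail hdropk
        simp only [List.tail_cons, List.tail_drop] at h
        exact h.symm
      rw [huu] at hdropk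
      have hnoq : '"' ∉ t.take k := by
        intro hmem
        obtain ⟨i, hi, hgi⟩ := List.getElem_of_mem hmem
        have hi' : i < k ∧ i < t.length := by simpa using hi
        apply hmin i hi'.1
        refine ⟨t.drop (i + 1), ?_⟩
        rw [List.getElem_take] at hgi
        rw [List.drop_eq_getElem_cons hi'.2, hgi]
        simp
      have hdec : (decide (PySem.Chars.find t ['"'] ≠ -1)) = true := decide_eq_true hq
      rw [hdec, Bool.true_and]
      apply Bool.eq_iff_iff.mpr
      rw [List.any_eq_true, PySem.Set.contains_iff]
      constructor
      · intro hmem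
        simp only [pvGenericSet, PySem.Set.mem_ofList] at hmem
        refine ⟨t.take k, hmem, ?_⟩
        rw [decide_eq_true_eq, hpre _,
          pv_name_prefix_iff t (t.take k) k (pv_names_quote_free _ hmem) hk hdropk hnoq]
      · rintro ⟨n, hmem, hdecn⟩
        rw [decide_eq_true_eq, hpre n,
          pv_name_prefix_iff t n k (pv_names_quote_free n hmem) hk hdropk hnoq] at hdecn
        subst hdecn
        simp only [pvGenericSet, PySem.Set.mem_ofList]
        exact hmem
  · rw [if_neg h6, eq_comm, List.any_eq_false]
    intro n _
    rw [decide_eq_true_eq]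
    rintro ⟨v, hv⟩
    apply h6
    rw [← hv, List.append_assoc, List.append_assoc]
    have hlen : ("name=\"".toList).length = 6 := by decide
    rw [← hlen, List.take_left]

-- B's scan of the whole line finds exactly the lines containing some generic
-- name="…" pattern (what A's per-name substring tests check)
theorem pv_scan_eq (s : List Char) :
    pvScanB s = pvGenericNames.any (fun n =>
      PySem.Chars.isIn ("name=\"".toList ++ n ++ ['"']) s) := by
  induction s with
  | nil => decide
  | cons c rest ih =>
    simp only [pvScanB]
    rw [ih, pv_hit_eq]
    apply Bool.eq_iff_iff.mpr
    simp only [Bool.or_eq_true, List.any_eq_true, decide_eq_true_eq,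
      PySem.Chars.isIn_iff_infix, List.infix_cons_iff]
    constructor
    · rintro (⟨n, hn, hp⟩ | ⟨n, hn, hp⟩)
      · exact ⟨n, hn, Or.inl hp⟩
      · exact ⟨n, hn, Or.inr hp⟩
    · rintro ⟨n, hn, hp | hp⟩
      · exact Or.inl ⟨n, hn, hp⟩
      · exact Or.inr ⟨n, hn, hp⟩

-- ===== VERDICT (by name: the statement is the Claim_ definition above) =====
theorem might_need_specific_locator_py_spec : Claim_equal_might_need_specific_locator_py := by
  intro line _
  unfold Spec_might_need_specific_locator_py
  unfold might_need_specific_locator_py might_need_specific_locator_py_alt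
  cases hb : PySem.Chars.isIn "get_by_role(\"button\"".toList line.toList with
  | false => simp
  | true =>
    cases he : PySem.Chars.isIn "exact=True".toList line.toList with
    | true => simp
    | false => simp [pv_scan_eq]
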